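-- pv_equiv track=rewrite | github.com/Silviase/IMPARA | src/m2_to_dataset.py | split_edits_by_annot
-- ===== SOURCE A (Python) =====
-- def split_edits_by_annot(edits):
--     res = {}
--     for edit in edits:
--         annot = edit[-1]
--         if annot not in res:
--             res[annot] = []
--         res[annot].append(edit)
--     return list(res.values())
-- ===== SOURCE B (Python) =====
-- def split_edits_by_annot(edits):
--     annots = []
--     for edit in edits:
--         annot = edit[-1]
--         if annot not in annots:
--             annots.append(annot)
--     return [[e for e in edits if e[-1] == a] for a in annots]
-- ===== Notes on version B (the rewrite author's own statement) =====
-- stated objective: alternative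
-- what changed: Replaces the dict-of-lists accumulator with a first-appearance list of annotator ids followed by one filtering comprehension per annotator (no dict at all).
import Mathlib
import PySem

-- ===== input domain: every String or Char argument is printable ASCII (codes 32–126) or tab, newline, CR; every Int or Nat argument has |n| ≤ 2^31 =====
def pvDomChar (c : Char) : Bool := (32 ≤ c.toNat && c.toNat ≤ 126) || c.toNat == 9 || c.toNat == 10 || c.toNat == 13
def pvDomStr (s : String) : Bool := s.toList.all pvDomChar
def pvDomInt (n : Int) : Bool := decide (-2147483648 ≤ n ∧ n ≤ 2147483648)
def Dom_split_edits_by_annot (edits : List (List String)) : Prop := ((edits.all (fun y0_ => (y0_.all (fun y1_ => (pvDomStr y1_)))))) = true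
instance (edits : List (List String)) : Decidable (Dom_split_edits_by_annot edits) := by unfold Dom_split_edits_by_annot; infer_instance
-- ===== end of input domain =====

-- B groups edits by annotator id (edit[-1]) with a first-appearance list of ids and one filter
-- per id instead of A's dict-of-lists accumulator; equal return value, no speed claim.

-- ===== PORT A =====
-- A: one pass building a dict annot -> list of edits, returning its values.
def split_edits_by_annot (edits : List (List String)) : List (List (List String)) :=
  let res : PySem.Dict String (List (List String)) :=
    edits.foldl (fun res edit =>
      let annot := (PySem.List.pyGet? edit (-1)).getD ""   -- edit[-1]; none (IndexError) excluded by Pre_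
      let res := if res.contains annot then res else res.insert annot []
      res.modify annot [] (fun l => l ++ [edit])) PySem.Dict.empty
  res.values

-- ===== PORT B =====
-- B: collect distinct annotator ids in first-appearance order, then one filter per id.
def split_edits_by_annot_alt (edits : List (List String)) : List (List (List String)) :=
  let annots : List String :=
    edits.foldl (fun annots edit =>
      let annot := (PySem.List.pyGet? edit (-1)).getD ""   -- edit[-1]; none (IndexError) excluded by Pre_
      if annot ∈ annots then annots else annots ++ [annot]) []
  annots.map (fun a => edits.filter (fun e => (PySem.List.pyGet? e (-1)).getD "" == a))

-- ===== PRECONDITION & SPEC =====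
-- Pre_ excludes inputs containing an empty edit, on which both A and B raise IndexError at edit[-1].
def Pre_split_edits_by_annot (edits : List (List String)) : Prop := ∀ e ∈ edits, e ≠ []
instance (edits : List (List String)) : Decidable (Pre_split_edits_by_annot edits) := by unfold Pre_split_edits_by_annot; infer_instance

def pvWitness_split_edits_by_annot : List (List String) := [["a", "x", "0"], ["b", "y", "1"], ["c", "z", "0"]]

def Spec_split_edits_by_annot (edits : List (List String)) (out : List (List (List String))) : Prop := out = split_edits_by_annot_alt edits
instance (edits : List (List String)) (out : List (List (List String))) : Decidable (Spec_split_edits_by_annot edits out) := by unfold Spec_split_edits_by_annot; infer_instance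

-- ===== CLAIM (what is proved, stated in full; the proofs are below) =====
def Claim_equal_split_edits_by_annot : Prop := ∀ (edits : List (List String)), Dom_split_edits_by_annot edits → Pre_split_edits_by_annot edits → Spec_split_edits_by_annot edits (split_edits_by_annot edits)

-- ===== LEMMAS AND PROOFS =====

-- the annotator id of an edit, as both ports compute it
def pvKey (e : List String) : String := (PySem.List.pyGet? e (-1)).getD ""

-- B's first-appearance id list, named for the proofs
def pvAnnots (edits : List (List String)) : List String :=
  edits.foldl (fun annots edit =>
    if pvKey edit ∈ annots then annots else annots ++ [pvKey edit]) []

lemma pvAnnots_eq_dedup (edits : List (List String)) :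
    pvAnnots edits = PySem.List.dedup (edits.map pvKey) := by
  unfold pvAnnots PySem.List.dedup PySem.Set.ofList
  rw [List.foldl_map]
  congr 1
  funext acc e
  simp [PySem.Set.add]

lemma mem_pvAnnots {a : String} {edits : List (List String)} :
    a ∈ pvAnnots edits ↔ a ∈ edits.map pvKey := by
  rw [pvAnnots_eq_dedup]; exact PySem.List.mem_dedup _ _

lemma nodup_pvAnnots (edits : List (List String)) : (pvAnnots edits).Nodup := by
  rw [pvAnnots_eq_dedup, PySem.List.dedup_eq_ofList]; exact PySem.Set.nodup_ofList _

-- A's dict accumulator, named for the proofs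
def pvLoopA (edits : List (List String)) : PySem.Dict String (List (List String)) :=
  edits.foldl (fun res edit =>
    let annot := pvKey edit
    let res := if res.contains annot then res else res.insert annot []
    res.modify annot [] (fun l => l ++ [edit])) PySem.Dict.empty

-- the main invariant: A's dict items are exactly B's (id, group) pairs
lemma items_pvLoopA (edits : List (List String)) :
    (pvLoopA edits).items
      = (pvAnnots edits).map (fun a => (a, edits.filter (fun e => pvKey e == a))) := by
  induction edits using List.reverseRecOn with
  | nil => rfl
  | append_singleton xs e ih =>
    have hk : (pvLoopA xs).keys = pvAnnots xs := by
      simp [PySem.Dict.keys, ih, Function.comp_def]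
    have hnd : (pvLoopA xs).keys.Nodup := hk ▸ nodup_pvAnnots xs
    have hstep : pvLoopA (xs ++ [e])
        = (let res := pvLoopA xs
           let annot := pvKey e
           let res := if res.contains annot then res else res.insert annot []
           res.modify annot [] (fun l => l ++ [e])) := by
      simp [pvLoopA]
    have hann : pvAnnots (xs ++ [e])
        = (if pvKey e ∈ pvAnnots xs then pvAnnots xs else pvAnnots xs ++ [pvKey e]) := by
      simp [pvAnnots]
    have hfilter : ∀ a : String, (xs ++ [e]).filter (fun e' => pvKey e' == a)
        = xs.filter (fun e' => pvKey e' == a) ++ (if pvKey e == a then [e] else []) := by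
      intro a
      rw [List.filter_append]
      by_cases h : pvKey e = a <;> simp [h]
    by_cases h : pvKey e ∈ pvAnnots xs
    · have hc : (pvLoopA xs).contains (pvKey e) = true := by
        rw [PySem.Dict.contains_eq_decide_mem_keys, hk]; simpa
      have hmem : (pvKey e, xs.filter (fun e' => pvKey e' == pvKey e)) ∈ (pvLoopA xs).items := by
        rw [ih]
        exact List.mem_map_of_mem h
      have hget : (pvLoopA xs).getD (pvKey e) []
          = xs.filter (fun e' => pvKey e' == pvKey e) :=
        PySem.Dict.getD_of_mem_items _ hmem hnd []
      rw [hstep]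
      simp only [hc, if_true, PySem.Dict.modify, hget]
      rw [PySem.Dict.items_insert_of_contains _ _ hc, ih, hann, if_pos h, List.map_map]
      apply List.map_congr_left
      intro a _
      by_cases ha : a = pvKey e
      · subst ha; simp [hfilter]
      · have : ¬ (pvKey e = a) := fun hh => ha hh.symm
        simp [ha, hfilter, this]
    · have hc : (pvLoopA xs).contains (pvKey e) = false := by
        rw [PySem.Dict.contains_eq_decide_mem_keys, hk]; simpa
      have hkeyabsent : ∀ x ∈ xs, ¬ (pvKey x == pvKey e) = true := by
        intro x hx hbe
        exact h (mem_pvAnnots.mpr (by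
          simp only [List.mem_map]
          exact ⟨x, hx, (beq_iff_eq.mp hbe)⟩))
      have hFnil : xs.filter (fun e' => pvKey e' == pvKey e) = [] :=
        List.filter_eq_nil_iff.mpr hkeyabsent
      have hitems1 : ((pvLoopA xs).insert (pvKey e) []).items
          = (pvLoopA xs).items ++ [(pvKey e, ([] : List (List String)))] :=
        PySem.Dict.items_insert_of_not_contains _ _ hc
      have hnd1 : ((pvLoopA xs).insert (pvKey e) []).keys.Nodup := by
        rw [PySem.Dict.keys, hitems1]
        simp only [List.map_append, List.map_cons, List.map_nil]
        rw [← PySem.Dict.keys, hk]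
        simp [List.nodup_append]
        exact ⟨nodup_pvAnnots xs, fun a ha haeq => h (haeq ▸ ha)⟩
      have hmem1 : (pvKey e, ([] : List (List String))) ∈ ((pvLoopA xs).insert (pvKey e) []).items := by
        rw [hitems1]; simp
      have hget1 : ((pvLoopA xs).insert (pvKey e) []).getD (pvKey e) [] = [] :=
        PySem.Dict.getD_of_mem_items _ hmem1 hnd1 []
      have hc1 : ((pvLoopA xs).insert (pvKey e) []).contains (pvKey e) = true :=
        PySem.Dict.contains_insert_self _ _ _
      rw [hstep]
      simp only [hc, Bool.false_eq_true, if_false, PySem.Dict.modify, hget1]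
      rw [PySem.Dict.items_insert_of_contains _ _ hc1, hitems1, hann, if_neg h]
      rw [List.map_append, ih, List.map_map, List.map_append]
      congr 1
      · apply List.map_congr_left
        intro a ha
        have hne : ¬ (a == pvKey e) = true := by
          intro hbe
          exact h (beq_iff_eq.mp hbe ▸ ha)
        have hne' : ¬ (pvKey e = a) := fun hh => hne (by simp [hh])
        simp [hfilter, hne']
        exact fun hh => hne (by simp [hh])
      · simp [hfilter, hFnil]

-- ===== VERDICT (by name: the statement is the Claim_ definition above) =====
theorem split_edits_by_annot_spec : Claim_equal_split_edits_by_annot := by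
  intro edits _ _
  show split_edits_by_annot edits = split_edits_by_annot_alt edits
  have hA : split_edits_by_annot edits = (pvLoopA edits).values := rfl
  have hB : split_edits_by_annot_alt edits
      = (pvAnnots edits).map (fun a => edits.filter (fun e => pvKey e == a)) := rfl
  rw [hA, hB, PySem.Dict.values, items_pvLoopA, List.map_map]
  rfl
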